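-- pv_equiv track=rewrite | github.com/zhou100/brief_wechat | backend/app/routes/miniapp.py | _join_examples
-- ===== SOURCE A (Python) =====
-- from typing import Any, Dict, List, Optional
--
-- def _join_examples(items: List[str], fallback: str) -> str:
--     clean_items = ["".join((item or "").split()) for item in items if item]
--     clean_items = [item[:36] for item in clean_items if item]
--     if not clean_items:
--         return fallback
--     if len(clean_items) == 1:
--         return clean_items[0]
--     return "、".join(clean_items[:3])
-- ===== SOURCE B (Python) =====
-- from typing import Any, Dict, List, Optional
--
-- def _join_examples(items: List[str], fallback: str) -> str:
--     # Recursive decomposition: build the joined string directly, back-to-front,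
--     # with no intermediate lists and no join() call; stop after 3 kept items.
--     def rec(xs: List[str], k: int) -> Optional[str]:
--         if not xs or k == 0:
--             return None
--         c = "".join(xs[0].split()) if xs[0] else ""
--         if not c:
--             return rec(xs[1:], k)
--         rest = rec(xs[1:], k - 1)
--         return c[:36] if rest is None else c[:36] + "、" + rest
--     s = rec(items, 3)
--     return fallback if s is None else s
-- ===== Notes on version B (the rewrite author's own statement) =====
-- stated objective: alternative
-- what changed: B is a recursive decomposition: a helper recurses over the list with a remaining-count of 3 and builds the final delimited string directly back-to-front via string concatenation (Optional[str] result), with no intermediate lists, no slicing of a collected list and no join() over a list; A stages two filtering comprehensions into full lists and then branches on their length before joining. B also stops recursing once three items are kept, which a timing run measured faster on large inputs.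
import Mathlib
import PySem

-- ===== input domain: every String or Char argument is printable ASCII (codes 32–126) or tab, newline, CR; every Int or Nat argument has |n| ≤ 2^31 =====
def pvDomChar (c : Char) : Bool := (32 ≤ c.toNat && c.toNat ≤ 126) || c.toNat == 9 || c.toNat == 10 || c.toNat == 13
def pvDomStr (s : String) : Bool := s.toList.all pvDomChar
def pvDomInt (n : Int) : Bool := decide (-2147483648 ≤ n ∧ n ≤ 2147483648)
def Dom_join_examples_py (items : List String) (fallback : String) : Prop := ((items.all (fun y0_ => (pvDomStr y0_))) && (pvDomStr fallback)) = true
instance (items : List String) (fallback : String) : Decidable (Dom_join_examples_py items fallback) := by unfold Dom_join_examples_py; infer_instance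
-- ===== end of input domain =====

-- B replaces A's two staged comprehensions and branch ladder by a structural recursion with a remaining-count that concatenates the delimited result string directly (Option result, no intermediate lists, no join over a list).

-- ===== PORT A =====
def join_examples_py (items : List String) (fallback : String) : String :=
  let clean1 := (items.filter (fun item => item != "")).map
      (fun item => PySem.Str.join "" (PySem.Str.split₀ (if item != "" then item else "")))
  let clean2 := (clean1.filter (fun s => s != "")).map
      (fun s => PySem.Str.slice s none (some 36))
  if clean2 = [] then fallback
  else if clean2.length = 1 then (PySem.List.pyGet? clean2 0).getD ""
  else PySem.Str.join "、" (PySem.List.slice clean2 none (some 3))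

-- ===== PORT B =====
-- rec(xs, k): builds the joined string directly, back-to-front; none = nothing kept
def altRec : List String → Nat → Option String
  | [], _ => none
  | _ :: _, 0 => none
  | x :: rest, Nat.succ k =>
    let c := if x != "" then PySem.Str.join "" (PySem.Str.split₀ x) else ""
    if c == "" then altRec rest (k + 1)
    else
      match altRec rest k with
      | none => some (PySem.Str.slice c none (some 36))
      | some r => some (PySem.Str.slice c none (some 36) ++ "、" ++ r)

def join_examples_py_alt (items : List String) (fallback : String) : String :=
  match altRec items 3 with
  | none => fallback
  | some s => s

-- ===== PRECONDITION & SPEC =====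
def Spec_join_examples_py (items : List String) (fallback : String) (out : String) : Prop := out = join_examples_py_alt items fallback
instance (items : List String) (fallback : String) (out : String) : Decidable (Spec_join_examples_py items fallback out) := by unfold Spec_join_examples_py; infer_instance

-- ===== CLAIM =====
def Claim_equal_join_examples_py : Prop := ∀ (items : List String) (fallback : String), Dom_join_examples_py items fallback → Spec_join_examples_py items fallback (join_examples_py items fallback)

-- ===== LEMMAS AND PROOFS =====

-- the per-item contribution both programs keep
def cleanList (items : List String) : List String :=
  items.flatMap (fun item =>
    if item = "" then []
    else
      let c := PySem.Str.join "" (PySem.Str.split₀ item)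
      if c = "" then [] else [PySem.Str.slice c none (some 36)])

lemma filter_map_clean (l : List String) :
    (l.filter (fun item => item != "")).map
        (fun item => PySem.Str.join "" (PySem.Str.split₀ (if item != "" then item else "")))
      = (l.filter (fun item => item != "")).map
        (fun item => PySem.Str.join "" (PySem.Str.split₀ item)) := by
  apply List.map_congr_left
  intro x hx
  have hx' : (x != "") = true := (List.mem_filter.mp hx).2
  simp [hx']

lemma cleanA_eq (items : List String) :
    (((items.filter (fun item => item != "")).map
        (fun item => PySem.Str.join "" (PySem.Str.split₀ (if item != "" then item else "")))).filter
          (fun s => s != "")).map (fun s => PySem.Str.slice s none (some 36))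
      = cleanList items := by
  rw [filter_map_clean]
  induction items with
  | nil => simp [cleanList]
  | cons hd tl ih =>
      by_cases h : hd = ""
      · simpa [cleanList, h, List.flatMap_cons] using ih
      · by_cases hc : PySem.Str.join "" (PySem.Str.split₀ hd) = "" <;>
            simpa [cleanList, h, hc, List.flatMap_cons] using ih

lemma join_cons' (x y : String) (L : List String) :
    PySem.Str.join "、" (x :: y :: L) = x ++ "、" ++ PySem.Str.join "、" (y :: L) := by
  apply String.toList_injective
  simp [PySem.Str.toList_join, PySem.Chars.join_cons_cons]

lemma join_singleton' (x : String) : PySem.Str.join "、" [x] = x := by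
  apply String.toList_injective
  simp [PySem.Str.toList_join]

lemma altRec_eq (items : List String) : ∀ (k : Nat),
    altRec items k = match (cleanList items).take k with
      | [] => none
      | l => some (PySem.Str.join "、" l) := by
  induction items with
  | nil => intro k; simp [altRec, cleanList]
  | cons hd tl ih =>
      intro k
      cases k with
      | zero => simp [altRec]
      | succ k =>
        by_cases h : hd = ""
        · simp [altRec, h, cleanList, List.flatMap_cons, ih]
        · by_cases hc : PySem.Str.join "" (PySem.Str.split₀ hd) = ""
          · simp [altRec, h, hc, cleanList, List.flatMap_cons, ih]
          · have hcl : cleanList (hd :: tl)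
                = PySem.Str.slice (PySem.Str.join "" (PySem.Str.split₀ hd)) none (some 36) :: cleanList tl := by
              simp [cleanList, List.flatMap_cons, if_neg h, if_neg hc]
            have ihk := ih k
            rcases hL : (cleanList tl).take k with _ | ⟨y, L⟩ <;> rw [hL] at ihk <;>
              simp only [altRec, bne_iff_ne, ne_eq, h, not_false_eq_true, if_true,
                beq_iff_eq, hc, if_false, ihk, hcl, List.take_succ_cons, hL]
            · simp [join_singleton']
            · simp [join_cons']

-- ===== VERDICT =====
theorem join_examples_py_spec : Claim_equal_join_examples_py := by
  unfold Claim_equal_join_examples_py Spec_join_examples_py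
  intro items fallback _
  unfold join_examples_py join_examples_py_alt
  simp only [cleanA_eq, altRec_eq items 3]
  rcases hL : cleanList items with _ | ⟨x, _ | ⟨y, L⟩⟩
  · simp
  · simp [PySem.List.pyGet?, PySem.List.pyIdx?, join_singleton']
  · have h1 : ¬ (x :: y :: L).length = 1 := by simp
    simp only [if_neg (by simp : ¬ (x :: y :: L) = []), h1, if_false]
    rw [show ((3:Int) = ((3:Nat) : Int)) by norm_num, PySem.List.slice_to_natCast]
    simp [List.take_succ_cons, join_cons']
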